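-- pv_equiv track=rewrite | github.com/Hung127/DoiNuiNuiDoi | model/matrix.py | _check_echelon_rules
-- ===== SOURCE A (Python) =====
-- def _check_echelon_rules(pivot_cols: list[int]) -> bool:
--     prev_pivot = -1
--     found_zero_row = False
--     for pivot in pivot_cols:
--         if found_zero_row and pivot != -1:
--             return False  # Non-zero after zero row
--         if pivot != -1 and pivot <= prev_pivot:
--             return False  # Pivot not strictly right
--         if pivot != -1:
--             prev_pivot = pivot
--         found_zero_row = found_zero_row or (pivot == -1)
--     return True
-- ===== SOURCE B (Python) =====
-- def _check_echelon_rules(pivot_cols: list[int]) -> bool: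
--     nonzero = [p for p in pivot_cols if p != -1]
--     return (pivot_cols[:len(nonzero)] == nonzero
--             and all(p >= 0 for p in nonzero)
--             and all(a < b for a, b in zip(nonzero, nonzero[1:])))
-- ===== Notes on version B (the rewrite author's own statement) =====
-- stated objective: simpler
-- what changed: Replaced A's single interleaved loop with two state flags (prev_pivot, found_zero_row) by extracting the list of real pivots once and checking three independent conditions: the real pivots form a prefix (no -1 before a pivot), all pivots are nonnegative, and adjacent pivots strictly increase.
import Mathlib
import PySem

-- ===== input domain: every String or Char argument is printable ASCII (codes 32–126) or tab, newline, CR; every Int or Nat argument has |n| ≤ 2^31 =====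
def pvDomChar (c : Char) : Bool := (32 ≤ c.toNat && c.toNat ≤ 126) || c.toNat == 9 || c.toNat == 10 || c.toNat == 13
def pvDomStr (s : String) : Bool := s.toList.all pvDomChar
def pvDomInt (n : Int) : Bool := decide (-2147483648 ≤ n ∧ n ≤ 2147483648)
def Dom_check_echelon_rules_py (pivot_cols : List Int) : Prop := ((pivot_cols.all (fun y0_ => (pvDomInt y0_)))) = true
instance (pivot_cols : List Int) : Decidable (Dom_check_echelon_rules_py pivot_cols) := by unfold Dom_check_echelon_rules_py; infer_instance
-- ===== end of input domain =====

-- B replaces A's single interleaved loop with two flags by a prefix extraction plus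
-- three independent conditions (objective: simpler; same O(n) cost).

-- ===== PORT A =====
-- the for-loop of A with its two state variables prev_pivot / found_zero_row
def pvALoop : List Int → Int → Bool → Bool
  | [], _, _ => true
  | p :: rest, prev, fz =>
    if fz && !(p == -1) then false
    else if !(p == -1) && decide (p ≤ prev) then false
    else pvALoop rest (if !(p == -1) then p else prev) (fz || (p == -1))

def check_echelon_rules_py (pivot_cols : List Int) : Bool :=
  pvALoop pivot_cols (-1) false

-- ===== PORT B =====
def check_echelon_rules_py_alt (pivot_cols : List Int) : Bool :=
  let nonzero := pivot_cols.filter (fun p => !(p == -1))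
  -- pivot_cols[:len(nonzero)]: slice with a nonnegative upper bound = take (PySem.List.slice_to_natCast)
  (pivot_cols.take nonzero.length == nonzero)
    && nonzero.all (fun p => decide (0 ≤ p))
    && (nonzero.zip nonzero.tail).all (fun ab => decide (ab.1 < ab.2))

-- ===== PRECONDITION & SPEC =====
def Spec_check_echelon_rules_py (pivot_cols : List Int) (out : Bool) : Prop := out = check_echelon_rules_py_alt pivot_cols
instance (pivot_cols : List Int) (out : Bool) : Decidable (Spec_check_echelon_rules_py pivot_cols out) := by unfold Spec_check_echelon_rules_py; infer_instance

-- ===== CLAIM (what is proved, stated in full; the proofs are below) =====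
def Claim_equal_check_echelon_rules_py : Prop := ∀ (pivot_cols : List Int), Dom_check_echelon_rules_py pivot_cols → Spec_check_echelon_rules_py pivot_cols (check_echelon_rules_py pivot_cols)

-- ===== LEMMAS AND PROOFS =====

-- "the head of l is greater than x" (true for empty l)
def pvHeadGT (x : Int) : List Int → Bool
  | [] => true
  | a :: _ => decide (x < a)

-- adjacent strict increase
def pvChain : List Int → Bool
  | [] => true
  | [_] => true
  | a :: b :: t => decide (a < b) && pvChain (b :: t)

theorem pvChain_cons (a : Int) (l : List Int) :
    pvChain (a :: l) = (pvHeadGT a l && pvChain l) := by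
  cases l <;> simp [pvChain, pvHeadGT]

theorem zip_all_eq_chain (l : List Int) :
    (l.zip l.tail).all (fun ab => decide (ab.1 < ab.2)) = pvChain l := by
  induction l with
  | nil => rfl
  | cons a t ih =>
    cases t with
    | nil => rfl
    | cons b t' =>
      simp only [List.tail_cons, List.zip_cons_cons, List.all_cons, pvChain]
      rw [← ih]
      simp

-- when found_zero_row is set, the loop accepts exactly the all-(-1) tails
theorem pvALoop_true (l : List Int) (prev : Int) :
    pvALoop l prev true = l.all (fun p => p == -1) := by
  induction l generalizing prev with
  | nil => rfl
  | cons p rest ih =>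
    by_cases hp : p = -1
    · subst hp; simp [pvALoop, ih]
    · simp [pvALoop, hp]

theorem filter_ne_nil_of_not_all (l : List Int)
    (h : l.all (fun p => p == -1) = false) :
    l.filter (fun p => !(p == -1)) ≠ [] := by
  simp only [List.all_eq_false] at h
  obtain ⟨x, hx, hne⟩ := h
  intro hnil
  have : x ∈ l.filter (fun p => !(p == -1)) := by
    simp [List.mem_filter, hx]
    simpa using hne
  rw [hnil] at this
  exact absurd this (List.not_mem_nil)

-- characterisation of the loop with found_zero_row unset
theorem pvALoop_false (l : List Int) (prev : Int) :
    pvALoop l prev false =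
      ((l.take (l.filter (fun p => !(p == -1))).length
          == l.filter (fun p => !(p == -1)))
        && pvHeadGT prev (l.filter (fun p => !(p == -1)))
        && pvChain (l.filter (fun p => !(p == -1)))) := by
  induction l generalizing prev with
  | nil => rfl
  | cons p rest ih =>
    by_cases hp : p = -1
    · subst hp
      have hfil : ((-1 : Int) :: rest).filter (fun p => !(p == -1))
          = rest.filter (fun p => !(p == -1)) := by simp
      rw [hfil]
      have hloop : pvALoop ((-1 : Int) :: rest) prev false
          = pvALoop rest prev true := by simp [pvALoop]
      rw [hloop, pvALoop_true]
      by_cases hall : rest.all (fun p => p == -1) = true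
      · have : rest.filter (fun p => !(p == -1)) = [] := by
          rw [List.filter_eq_nil_iff]
          intro x hx
          simp only [List.all_eq_true] at hall
          simpa using hall x hx
        simp [this, hall, pvHeadGT, pvChain]
      · have hall' : rest.all (fun p => p == -1) = false :=
          Bool.eq_false_iff.mpr hall
        rw [hall']
        have hne := filter_ne_nil_of_not_all rest hall'
        cases hnz : rest.filter (fun p => !(p == -1)) with
        | nil => exact absurd hnz hne
        | cons a t =>
          have ha : a ∈ rest.filter (fun p => !(p == -1)) := by
            rw [hnz]; exact List.mem_cons_self
          have ha' : ¬ (a = -1) := by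
            rw [List.mem_filter] at ha
            simpa using ha.2
          simp [List.take_succ_cons]
          exact fun h _ _ => absurd h.symm ha'
    · -- p is a real pivot
      have hfil : (p :: rest).filter (fun q => !(q == -1))
          = p :: rest.filter (fun q => !(q == -1)) := by
        simp [hp]
      rw [hfil]
      by_cases hle : p ≤ prev
      · have : pvALoop (p :: rest) prev false = false := by
          simp [pvALoop, hp, hle]
        rw [this]
        have : pvHeadGT prev (p :: rest.filter (fun q => !(q == -1))) = false := by
          simp [pvHeadGT]; omega
        simp [this]
      · have hpf : (p == -1) = false := by simp [hp]
        have hloop : pvALoop (p :: rest) prev false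
            = pvALoop rest p false := by
          simp [pvALoop, hp, hle]
          rw [hpf]
        rw [hloop, ih]
        have hgt : pvHeadGT prev (p :: rest.filter (fun q => !(q == -1))) = true := by
          simp [pvHeadGT]; omega
        rw [pvChain_cons]
        simp [List.take_succ_cons, hgt]
        cases h1 : rest.take (rest.filter (fun q => !(q == -1))).length
            == rest.filter (fun q => !(q == -1)) <;>
          cases h2 : pvHeadGT p (rest.filter (fun q => !(q == -1))) <;>
          cases h3 : pvChain (rest.filter (fun q => !(q == -1))) <;> simp
      
-- under the chain condition, "head > x" propagates to "all > x"
theorem chain_head_all : ∀ (l : List Int) (x : Int),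
    pvChain l = true → pvHeadGT x l = true →
    l.all (fun p => decide (x < p)) = true := by
  intro l
  induction l with
  | nil => intro x _ _; rfl
  | cons a t ih =>
    intro x hc hh
    rw [pvChain_cons, Bool.and_eq_true] at hc
    have hxa : x < a := by simpa [pvHeadGT] using hh
    have hta : t.all (fun p => decide (a < p)) = true := ih a hc.2 hc.1
    simp only [List.all_eq_true, decide_eq_true_eq] at hta ⊢
    exact fun p hp => by
      cases List.mem_cons.mp hp with
      | inl h => omega
      | inr h => have := hta p h; omega

theorem headGT_of_all (l : List Int)
    (h : l.all (fun p => decide (0 ≤ p)) = true) :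
    pvHeadGT (-1) l = true := by
  cases l with
  | nil => rfl
  | cons a t =>
    simp only [List.all_eq_true, decide_eq_true_eq] at h
    have := h a List.mem_cons_self
    simp [pvHeadGT]; omega

theorem headGT_chain_eq_all (l : List Int) :
    (pvHeadGT (-1) l && pvChain l) = (l.all (fun p => decide (0 ≤ p)) && pvChain l) := by
  by_cases hc : pvChain l = true
  · rw [hc, Bool.and_true, Bool.and_true]
    by_cases hh : pvHeadGT (-1) l = true
    · rw [hh]
      symm
      have hall := chain_head_all l (-1) hc hh
      simp only [List.all_eq_true, decide_eq_true_eq] at hall ⊢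
      exact fun p hp => by have := hall p hp; omega
    · rw [Bool.eq_false_iff.mpr hh]
      symm
      rw [Bool.eq_false_iff]
      intro ha
      exact hh (headGT_of_all l ha)
  · rw [Bool.eq_false_iff.mpr hc]
    simp

-- ===== VERDICT (by name: the statement is the Claim_ definition above) =====
theorem check_echelon_rules_py_spec : Claim_equal_check_echelon_rules_py := by
  intro pivot_cols _
  unfold Spec_check_echelon_rules_py check_echelon_rules_py check_echelon_rules_py_alt
  rw [pvALoop_false]
  simp only [zip_all_eq_chain]
  rw [Bool.and_assoc, headGT_chain_eq_all, ← Bool.and_assoc]
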